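-- pv_equiv track=rewrite | github.com/nonoSecreta/distribution_NN | scan_ugly_expression.py | build_math_mode_mask
-- ===== SOURCE A (Python) =====
-- def build_math_mode_mask(text):
--     """
--     Build a boolean mask array (same length as text),
--     where True means "this character is inside a LaTeX math environment ($ or $$)".
--     """
--     in_math_mode = [False] * len(text)
--     i = 0
--     in_inline = False   # $...$
--     in_display = False  # $$...$$
--     length = len(text)
--
--     while i < length:
--         if text.startswith('$$', i):
--             in_display = not in_display
--             # Mark these two '$$' as math mode (if you want)
--             for k in range(i, i+2):
--                 if k < length:
--                     in_math_mode[k] = in_display or in_inline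
--             i += 2
--         elif text[i] == '$':
--             in_inline = not in_inline
--             in_math_mode[i] = in_display or in_inline
--             i += 1
--         else:
--             if in_display or in_inline:
--                 in_math_mode[i] = True
--             i += 1
--     return in_math_mode
-- ===== SOURCE B (Python) =====
-- def build_math_mode_mask(text):
--     """
--     Build a boolean mask array (same length as text),
--     where True means "this character is inside a LaTeX math environment ($ or $$)".
--     """
--     n = len(text)
--     # First pass: jump from '$' to '$' with str.find, recording delimiter events
--     # (start index, state after toggling); plain-text gaps stay implicit.
--     events = []
--     i = 0
--     in_inline = False
--     in_display = False
--     while True: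
--         j = text.find('$', i)
--         if j == -1:
--             break
--         if text.startswith('$$', j):
--             in_display = not in_display
--             events.append((j, in_display or in_inline))
--             i = j + 2
--         else:
--             in_inline = not in_inline
--             events.append((j, in_display or in_inline))
--             i = j + 1
--     # Second pass: the mask is constant from each delimiter start to the next,
--     # so fill whole spans at once; everything before the first delimiter is False.
--     mask = [False] * n
--     for idx, (start, state) in enumerate(events):
--         end = events[idx + 1][0] if idx + 1 < len(events) else n
--         mask[start:end] = [state] * (end - start)
--     return mask
-- ===== Notes on version B (the rewrite author's own statement) =====
-- stated objective: faster
-- what changed: Replaces A's per-character while-loop that writes the mask cell by cell with two passes: a scan that jumps between '$' delimiters via str.find recording toggle events, then bulk slice-assignments filling each constant span [delimiter start, next delimiter start).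
import Mathlib
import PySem

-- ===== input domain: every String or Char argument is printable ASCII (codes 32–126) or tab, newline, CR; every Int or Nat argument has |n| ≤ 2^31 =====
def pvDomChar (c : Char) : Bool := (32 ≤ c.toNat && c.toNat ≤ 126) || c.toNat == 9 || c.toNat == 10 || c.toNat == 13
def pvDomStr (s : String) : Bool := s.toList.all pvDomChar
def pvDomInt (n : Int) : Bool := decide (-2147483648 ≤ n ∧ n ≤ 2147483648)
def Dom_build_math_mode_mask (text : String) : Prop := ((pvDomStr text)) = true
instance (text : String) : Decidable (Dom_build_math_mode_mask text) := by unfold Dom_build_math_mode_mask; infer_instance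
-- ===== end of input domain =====

-- B replaces A's char-by-char loop that writes the mask cell by cell with two passes:
-- a scan that jumps between '$' delimiters recording toggle events, then span fills of the mask.

-- ===== PORT A =====
-- A's while loop: index i, two flags, mask written in place (List.set = the in-place write).
def pvLoopA (chars : List Char) (mask : List Bool) (i : Nat) (inl disp : Bool) : List Bool :=
  if h : i < chars.length then
    if (chars.drop i).take 2 = ['$', '$'] then          -- text.startswith('$$', i)
      let disp' := !disp
      let v := disp' || inl
      -- for k in range(i, i+2): if k < length: in_math_mode[k] = v
      let mask1 := if i < chars.length then mask.set i v else mask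
      let mask2 := if i + 1 < chars.length then mask1.set (i+1) v else mask1
      pvLoopA chars mask2 (i+2) inl disp'
    else if chars[i] = '$' then
      let inl' := !inl
      pvLoopA chars (mask.set i (disp || inl')) (i+1) inl' disp
    else
      pvLoopA chars (if disp || inl then mask.set i true else mask) (i+1) inl disp
  else mask
termination_by chars.length - i

def build_math_mode_mask (text : String) : List Bool :=
  pvLoopA text.toList (List.replicate text.toList.length false) 0 false false

-- ===== PORT B =====
-- text.find('$', i) for a Nat start i: least index ≥ i holding '$', none = -1
-- (exact for str.find on a start with 0 ≤ start, which is the only way B calls it).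
def pvFindDollar (chars : List Char) (i : Nat) : Option Nat :=
  match (chars.drop i).findIdx? (· = '$') with
  | some k => some (i + k)
  | none => none

-- first pass of B: the delimiter events (start index, state after the toggle)
def pvScanB (chars : List Char) (i : Nat) (inl disp : Bool) : List (Nat × Bool) :=
  match h : pvFindDollar chars i with
  | none => []
  | some j =>
    if (chars.drop j).take 2 = ['$', '$'] then          -- text.startswith('$$', j)
      (j, (!disp) || inl) :: pvScanB chars (j + 2) inl (!disp)
    else
      (j, disp || (!inl)) :: pvScanB chars (j + 1) (!inl) disp
termination_by chars.length - i
decreasing_by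
  all_goals
    have hj : i ≤ j ∧ j < chars.length := by
      unfold pvFindDollar at h
      cases hf : (chars.drop i).findIdx? (· = '$') with
      | none => simp [hf] at h
      | some k =>
        simp [hf] at h
        have hk := (List.findIdx?_eq_some_iff_findIdx_eq.mp hf).1
        simp [List.length_drop] at hk
        omega
  all_goals omega

-- 'events[idx+1][0] if idx+1 < len(events) else n' — the next event's start, else the text length
def pvNext (events : List (Nat × Bool)) (n : Nat) : Nat :=
  match events with
  | (nxt, _) :: _ => nxt
  | [] => n

-- second pass of B: fill each event's span [start, next start) with its state
-- (mask[start:end] = [state]*(end-start) — the Python slice assignment)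
def pvFillB (mask : List Bool) (events : List (Nat × Bool)) (n : Nat) : List Bool :=
  match events with
  | [] => mask
  | (start, state) :: rest =>
    let e := pvNext rest n
    pvFillB (mask.take start ++ List.replicate (e - start) state ++ mask.drop e) rest n

def build_math_mode_mask_alt (text : String) : List Bool :=
  pvFillB (List.replicate text.toList.length false)
    (pvScanB text.toList 0 false false) text.toList.length

-- ===== PRECONDITION & SPEC =====
def Spec_build_math_mode_mask (text : String) (out : List Bool) : Prop := out = build_math_mode_mask_alt text
instance (text : String) (out : List Bool) : Decidable (Spec_build_math_mode_mask text out) := by unfold Spec_build_math_mode_mask; infer_instance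

-- ===== CLAIM (what is proved, stated in full; the proofs are below) =====
def Claim_equal_build_math_mode_mask : Prop := ∀ (text : String), Dom_build_math_mode_mask text → Spec_build_math_mode_mask text (build_math_mode_mask text)

-- ===== LEMMAS AND PROOFS =====

-- reference function: the mask both programs compute, by structural recursion on the text
def pvSpec : List Char → Bool → Bool → List Bool
  | [], _, _ => []
  | [c], inl, disp => if c = '$' then [disp || (!inl)] else [disp || inl]
  | c :: c2 :: rest, inl, disp =>
    if c = '$' then
      if c2 = '$' then ((!disp) || inl) :: ((!disp) || inl) :: pvSpec rest inl (!disp)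
      else (disp || (!inl)) :: pvSpec (c2 :: rest) (!inl) disp
    else (disp || inl) :: pvSpec (c2 :: rest) inl disp

-- first '$' at index ≥ i, or the length when there is none
def pvG (chars : List Char) (i : Nat) : Nat :=
  match pvFindDollar chars i with
  | some j => j
  | none => chars.length

theorem pvG_none (chars : List Char) (i : Nat) (hf : pvFindDollar chars i = none) :
    pvG chars i = chars.length := by unfold pvG; rw [hf]

theorem pvG_some (chars : List Char) (i j : Nat) (hf : pvFindDollar chars i = some j) :
    pvG chars i = j := by unfold pvG; rw [hf]

theorem pvScanB_none (chars : List Char) (i : Nat) (inl disp : Bool)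
    (hf : pvFindDollar chars i = none) : pvScanB chars i inl disp = [] := by
  rw [pvScanB, hf]

theorem pvScanB_some (chars : List Char) (i j : Nat) (inl disp : Bool)
    (hf : pvFindDollar chars i = some j) :
    pvScanB chars i inl disp =
      if (chars.drop j).take 2 = ['$', '$'] then
        (j, (!disp) || inl) :: pvScanB chars (j + 2) inl (!disp)
      else
        (j, disp || (!inl)) :: pvScanB chars (j + 1) (!inl) disp := by
  rw [pvScanB, hf]

theorem pvFind_none (chars : List Char) (i : Nat) (h : chars.length ≤ i) :
    pvFindDollar chars i = none := by
  unfold pvFindDollar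
  rw [List.drop_eq_nil_of_le h]
  simp

theorem pvFind_self (chars : List Char) (i : Nat) (h : i < chars.length)
    (hc : chars[i] = '$') : pvFindDollar chars i = some i := by
  unfold pvFindDollar
  rw [List.drop_eq_getElem_cons h, List.findIdx?_cons]
  simp only [hc, decide_true, if_true]
  simp

theorem pvFind_succ (chars : List Char) (i : Nat) (h : i < chars.length)
    (hc : chars[i] ≠ '$') : pvFindDollar chars i = pvFindDollar chars (i + 1) := by
  unfold pvFindDollar
  rw [List.drop_eq_getElem_cons h, List.findIdx?_cons]
  simp only [hc, decide_false, Bool.false_eq_true, if_false]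
  cases hf : (chars.drop (i + 1)).findIdx? (· = '$') with
  | none => simp
  | some k =>
    simp only [Option.map_some]
    exact congrArg some (by omega)

theorem pvFind_found (chars : List Char) (i j : Nat)
    (hf : pvFindDollar chars i = some j) :
    i ≤ j ∧ j < chars.length ∧ chars[j]? = some '$' := by
  unfold pvFindDollar at hf
  cases hk : (chars.drop i).findIdx? (· = '$') with
  | none => simp [hk] at hf
  | some k =>
    simp [hk] at hf
    have h1 := (List.findIdx?_eq_some_iff_findIdx_eq.mp hk).1
    have h2 : ((chars.drop i)[k]'h1 = '$') := by
      have := List.findIdx?_eq_some_iff_getElem.mp hk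
      obtain ⟨_, hp, _⟩ := this
      simpa using hp
    have hlen : k < chars.length - i := by simpa using h1
    refine ⟨by omega, by omega, ?_⟩
    rw [List.getElem?_eq_getElem (by omega)]
    rw [List.getElem_drop] at h2
    simp only [← hf]
    exact congrArg some h2

theorem pvG_lb (chars : List Char) (i : Nat) (h : i ≤ chars.length) :
    i ≤ pvG chars i ∧ pvG chars i ≤ chars.length := by
  cases hf : pvFindDollar chars i with
  | none => rw [pvG_none chars i hf]; omega
  | some j =>
    rw [pvG_some chars i j hf]
    have := pvFind_found chars i j hf
    omega

theorem spec_dd (chars : List Char) (j : Nat) (inl disp : Bool)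
    (hpf : (chars.drop j).take 2 = ['$', '$']) :
    pvSpec (chars.drop j) inl disp
      = ((!disp) || inl) :: ((!disp) || inl) :: pvSpec (chars.drop (j + 2)) inl (!disp) := by
  have h2 : chars.drop j = '$' :: '$' :: chars.drop (j + 2) := by
    conv_lhs => rw [← List.take_append_drop 2 (chars.drop j)]
    rw [hpf, List.drop_drop]
    rfl
  rw [h2]
  simp [pvSpec]

theorem spec_d (chars : List Char) (j : Nat) (inl disp : Bool) (h : j < chars.length)
    (hc : chars[j] = '$') (hn : (chars.drop j).take 2 ≠ ['$', '$']) :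
    pvSpec (chars.drop j) inl disp
      = (disp || (!inl)) :: pvSpec (chars.drop (j + 1)) (!inl) disp := by
  rw [List.drop_eq_getElem_cons h, hc]
  cases hdm : chars.drop (j + 1) with
  | nil => simp [pvSpec]
  | cons c2 r2 =>
    have hc2 : c2 ≠ '$' := by
      intro he
      apply hn
      rw [List.drop_eq_getElem_cons h, hdm, hc, he]
      rfl
    simp [pvSpec, hc2]

theorem spec_plain (chars : List Char) (i : Nat) (inl disp : Bool) (h : i < chars.length)
    (hc : chars[i] ≠ '$') :
    pvSpec (chars.drop i) inl disp = (disp || inl) :: pvSpec (chars.drop (i + 1)) inl disp := by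
  rw [List.drop_eq_getElem_cons h]
  cases hdm : chars.drop (i + 1) with
  | nil => simp [pvSpec, hc]
  | cons c2 r2 => simp [pvSpec, hc]

-- over a '$'-free stretch the reference mask is constant
theorem spec_gap (chars : List Char) :
    ∀ (d i : Nat) (inl disp : Bool), chars.length - i ≤ d → i ≤ chars.length →
      pvSpec (chars.drop i) inl disp
        = List.replicate (pvG chars i - i) (disp || inl)
            ++ pvSpec (chars.drop (pvG chars i)) inl disp := by
  intro d
  induction d with
  | zero =>
    intro i inl disp hd hi
    have hie : i = chars.length := by omega
    subst hie
    rw [pvG_none chars chars.length (pvFind_none chars chars.length le_rfl)]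
    simp
  | succ d ih =>
    intro i inl disp hd hi
    by_cases hi2 : i < chars.length
    · by_cases hc : chars[i] = '$'
      · rw [pvG_some chars i i (pvFind_self chars i hi2 hc)]
        simp
      · have hg : pvG chars i = pvG chars (i + 1) := by
          unfold pvG; rw [pvFind_succ chars i hi2 hc]
        have hlb := pvG_lb chars (i + 1) (by omega)
        rw [spec_plain chars i inl disp hi2 hc, hg,
            ih (i + 1) inl disp (by omega) (by omega)]
        have hrep : pvG chars (i + 1) - i = (pvG chars (i + 1) - (i + 1)) + 1 := by omega
        rw [hrep, List.replicate_succ]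
        simp
    · have hie : i = chars.length := by omega
      subst hie
      rw [pvG_none chars chars.length (pvFind_none chars chars.length le_rfl)]
      simp

theorem scanB_next (chars : List Char) (i : Nat) (inl disp : Bool) :
    pvNext (pvScanB chars i inl disp) chars.length = pvG chars i := by
  cases hf : pvFindDollar chars i with
  | none => rw [pvScanB_none chars i inl disp hf, pvG_none chars i hf]; rfl
  | some j =>
    rw [pvScanB_some chars i j inl disp hf, pvG_some chars i j hf]
    split <;> rfl

-- B's fill over B's scan produces the reference mask from the first delimiter on,
-- keeping the given mask untouched before it
theorem fillB_scanB (chars : List Char) (i : Nat) (inl disp : Bool) :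
    ∀ mask : List Bool, i ≤ chars.length → mask.length = chars.length →
      pvFillB mask (pvScanB chars i inl disp) chars.length
        = List.take (pvG chars i) mask
            ++ pvSpec (chars.drop (pvG chars i)) inl disp := by
  refine pvScanB.induct chars
    (fun i inl disp => ∀ mask : List Bool, i ≤ chars.length → mask.length = chars.length →
      pvFillB mask (pvScanB chars i inl disp) chars.length
        = List.take (pvG chars i) mask
            ++ pvSpec (chars.drop (pvG chars i)) inl disp) ?_ ?_ ?_ i inl disp
  case _ =>
    intro i inl disp hf mask hi hlen
    rw [pvScanB_none chars i inl disp hf, pvG_none chars i hf, pvFillB, List.drop_length,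
        ← hlen, List.take_length]
    simp [pvSpec]
  case _ =>
    intro i inl disp j hf hpf ih mask hi hlen
    obtain ⟨hij, hjn, _⟩ := pvFind_found chars i j hf
    have hj2 : j + 2 ≤ chars.length := by
      have h2 : ((chars.drop j).take 2).length = 2 := by rw [hpf]; rfl
      simp only [List.length_take, List.length_drop] at h2
      omega
    have hlb := pvG_lb chars (j + 2) hj2
    have hgj : pvG chars i = j := pvG_some chars i j hf
    rw [pvScanB_some chars i j inl disp hf, if_pos hpf, pvFillB]
    simp only [scanB_next]
    set v := (!disp) || inl with hv
    set e := pvG chars (j + 2) with he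
    have hlen' : (mask.take j ++ List.replicate (e - j) v ++ mask.drop e).length
        = chars.length := by
      simp only [List.length_append, List.length_take, List.length_replicate,
        List.length_drop, hlen]
      omega
    rw [ih _ (by omega) hlen']
    have htk : List.take e (mask.take j ++ List.replicate (e - j) v ++ mask.drop e)
        = mask.take j ++ List.replicate (e - j) v := by
      apply List.take_left'
      simp only [List.length_append, List.length_take, List.length_replicate, hlen]
      omega
    rw [htk, hgj, spec_dd chars j inl disp hpf,
        spec_gap chars (chars.length - (j + 2)) (j + 2) inl (!disp) le_rfl hj2]
    rw [← he]
    have hrep : v :: v :: List.replicate (e - (j + 2)) ((!disp) || inl)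
        = List.replicate (e - j) v := by
      rw [hv]
      have h3 : e - j = (e - (j + 2)) + 1 + 1 := by omega
      rw [h3, List.replicate_succ, List.replicate_succ]
    simp only [← hrep]
    simp [hv]
  case _ =>
    intro i inl disp j hf hpf ih mask hi hlen
    obtain ⟨hij, hjn, hcq⟩ := pvFind_found chars i j hf
    have hc : chars[j] = '$' := by
      rw [List.getElem?_eq_getElem hjn] at hcq
      exact Option.some.inj hcq
    have hlb := pvG_lb chars (j + 1) (by omega)
    have hgj : pvG chars i = j := pvG_some chars i j hf
    rw [pvScanB_some chars i j inl disp hf, if_neg hpf, pvFillB]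
    simp only [scanB_next]
    set v := disp || (!inl) with hv
    set e := pvG chars (j + 1) with he
    have hlen' : (mask.take j ++ List.replicate (e - j) v ++ mask.drop e).length
        = chars.length := by
      simp only [List.length_append, List.length_take, List.length_replicate,
        List.length_drop, hlen]
      omega
    rw [ih _ (by omega) hlen']
    have htk : List.take e (mask.take j ++ List.replicate (e - j) v ++ mask.drop e)
        = mask.take j ++ List.replicate (e - j) v := by
      apply List.take_left'
      simp only [List.length_append, List.length_take, List.length_replicate, hlen]
      omega
    rw [htk, hgj, spec_d chars j inl disp hjn hc hpf,
        spec_gap chars (chars.length - (j + 1)) (j + 1) (!inl) disp le_rfl (by omega)]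
    rw [← he]
    have hrep : v :: List.replicate (e - (j + 1)) (disp || (!inl))
        = List.replicate (e - j) v := by
      rw [hv]
      have h3 : e - j = (e - (j + 1)) + 1 := by omega
      rw [h3, List.replicate_succ]
    simp only [← hrep]
    simp [hv]

-- A's in-place loop also produces the reference mask
theorem loopA_spec (chars : List Char) (mask : List Bool) (i : Nat) (inl disp : Bool) :
    ∀ P : List Bool, P.length = i → i ≤ chars.length →
      mask = P ++ List.replicate (chars.length - i) false →
      pvLoopA chars mask i inl disp = P ++ pvSpec (chars.drop i) inl disp := by
  refine pvLoopA.induct chars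
    (fun mask i inl disp => ∀ P : List Bool, P.length = i → i ≤ chars.length →
      mask = P ++ List.replicate (chars.length - i) false →
      pvLoopA chars mask i inl disp = P ++ pvSpec (chars.drop i) inl disp)
    ?_ ?_ ?_ ?_ mask i inl disp
  case _ =>
    intro mask i inl disp h hpf disp' vv mask1 mask2 ih P hP hi hmask
    have hj2 : i + 2 ≤ chars.length := by
      have h2 : ((chars.drop i).take 2).length = 2 := by rw [hpf]; rfl
      simp only [List.length_take, List.length_drop] at h2
      omega
    have hlt2 : i + 1 < chars.length := by omega
    have hrep : List.replicate (chars.length - i) false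
        = false :: false :: List.replicate (chars.length - (i + 2)) false := by
      have h3 : chars.length - i = (chars.length - (i + 2)) + 1 + 1 := by omega
      rw [h3, List.replicate_succ, List.replicate_succ]
    have hm1 : mask.set i ((!disp) || inl)
        = P ++ ((!disp) || inl) :: false :: List.replicate (chars.length - (i + 2)) false := by
      rw [hmask, List.set_append, if_neg (by omega), hP, Nat.sub_self, hrep]
      simp
    have hm2 : (mask.set i ((!disp) || inl)).set (i + 1) ((!disp) || inl)
        = (P ++ [(!disp) || inl, (!disp) || inl])
            ++ List.replicate (chars.length - (i + 2)) false := by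
      rw [hm1, List.set_append, if_neg (by omega), hP]
      have h4 : i + 1 - i = 1 := by omega
      rw [h4]
      simp
    have hmask2 : mask2
        = (P ++ [(!disp) || inl, (!disp) || inl])
            ++ List.replicate (chars.length - (i + 2)) false := by
      simp only [mask2, mask1, vv, disp', dif_pos h, dif_pos hlt2]
      exact hm2
    have hrec := ih (P ++ [(!disp) || inl, (!disp) || inl]) (by simp [hP]) (by omega) hmask2
    rw [pvLoopA, dif_pos h, if_pos hpf]
    exact hrec.trans (by rw [spec_dd chars i inl disp hpf]; simp [disp'])
  case _ =>
    intro mask i inl disp h hpf hc inl' ih P hP hi hmask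
    have hrep : List.replicate (chars.length - i) false
        = false :: List.replicate (chars.length - (i + 1)) false := by
      have h3 : chars.length - i = (chars.length - (i + 1)) + 1 := by omega
      rw [h3, List.replicate_succ]
    have hm1 : mask.set i (disp || inl')
        = (P ++ [disp || (!inl)]) ++ List.replicate (chars.length - (i + 1)) false := by
      rw [hmask, List.set_append, if_neg (by omega), hP, Nat.sub_self, hrep]
      simp [inl']
    have hrec := ih (P ++ [disp || (!inl)]) (by simp [hP]) (by omega) hm1
    rw [pvLoopA, dif_pos h, if_neg hpf, if_pos hc]
    exact hrec.trans (by rw [spec_d chars i inl disp h hc hpf]; simp [inl'])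
  case _ =>
    intro mask i inl disp h hpf hc ih P hP hi hmask
    have hrep : List.replicate (chars.length - i) false
        = false :: List.replicate (chars.length - (i + 1)) false := by
      have h3 : chars.length - i = (chars.length - (i + 1)) + 1 := by omega
      rw [h3, List.replicate_succ]
    have hm1 : (if _h : (disp || inl) = true then mask.set i true else mask)
        = (P ++ [disp || inl]) ++ List.replicate (chars.length - (i + 1)) false := by
      by_cases hb : (disp || inl) = true
      · rw [dif_pos hb, hmask, List.set_append, if_neg (by omega), hP, Nat.sub_self, hrep, hb]
        simp
      · have hb' : (disp || inl) = false := by revert hb; cases (disp || inl) <;> simp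
        rw [dif_neg hb, hmask, hrep, hb']
        simp
    have hrec := ih (P ++ [disp || inl]) (by simp [hP]) (by omega) hm1
    rw [pvLoopA, dif_pos h, if_neg hpf, if_neg hc]
    exact hrec.trans (by rw [spec_plain chars i inl disp h hc]; simp)
  case _ =>
    intro mask i inl disp h P hP hi hmask
    have hie : i = chars.length := by omega
    rw [pvLoopA, dif_neg h, hmask, hie]
    simp [pvSpec]

-- ===== VERDICT (by name: the statement is the Claim_ definition above) =====
theorem build_math_mode_mask_spec : Claim_equal_build_math_mode_mask := by
  unfold Claim_equal_build_math_mode_mask Spec_build_math_mode_mask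
  intro text _
  unfold build_math_mode_mask build_math_mode_mask_alt
  set chars := text.toList with hch
  have hA : pvLoopA chars (List.replicate chars.length false) 0 false false
      = pvSpec chars false false := by
    have h0 := loopA_spec chars (List.replicate chars.length false) 0 false false
      [] rfl (Nat.zero_le _) (by simp)
    simpa using h0
  have hB := fillB_scanB chars 0 false false (List.replicate chars.length false)
    (Nat.zero_le _) (by simp)
  have hg := pvG_lb chars 0 (Nat.zero_le _)
  have hgap := spec_gap chars chars.length 0 false false (by omega) (Nat.zero_le _)
  rw [hA, hB, List.take_replicate, min_eq_left hg.2]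
  simpa using hgap
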